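-- pv_equiv track=rewrite | github.com/telesol/ladder | k_generator_v2.py | compute_m_sequence
-- ===== SOURCE A (Python) =====
-- def compute_m_sequence(k):
--     """
--     Compute m[n] from known k values
--     Since d=1 for most n: m[n] = 2^n - k[n] + 2*k[n-1]
--     """
--     m = {}
--     for n in range(2, max(k.keys()) + 1):
--         if n in k and n-1 in k:
--             # From: k[n] = 2*k[n-1] + adj[n]
--             # And:  adj[n] = 2^n - m[n]*k[d[n]]
--             # If d[n]=1: adj[n] = 2^n - m[n]
--             adj_n = k[n] - 2*k[n-1]
--             m_n = 2**n - adj_n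
--             m[n] = m_n
--     return m
-- ===== SOURCE B (Python) =====
-- def compute_m_sequence(k):
--     """
--     Compute m[n] from known k values
--     Since d=1 for most n: m[n] = 2^n - k[n] + 2*k[n-1]
--     """
--     m = {}
--     prev = None
--     for n, kn in sorted(k.items(), key=lambda item: item[0]):
--         if prev is not None and prev[0] == n - 1 and n >= 2:
--             m[n] = 2 ** n - kn + 2 * prev[1]
--         prev = (n, kn)
--     return m
-- ===== Notes on version B (the rewrite author's own statement) =====
-- stated objective: alternative
-- what changed: B sorts the items once and does a single adjacent-pair scan carrying the previous (key, value): the consecutive-key test prev[0] == n-1 replaces every dict membership test and lookup, and the scan of range(2, max(k)+1) and the max() call disappear.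
-- outside the precondition, e.g. on compute_m_sequence({}): A raises ValueError, B returns {}
import Mathlib
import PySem

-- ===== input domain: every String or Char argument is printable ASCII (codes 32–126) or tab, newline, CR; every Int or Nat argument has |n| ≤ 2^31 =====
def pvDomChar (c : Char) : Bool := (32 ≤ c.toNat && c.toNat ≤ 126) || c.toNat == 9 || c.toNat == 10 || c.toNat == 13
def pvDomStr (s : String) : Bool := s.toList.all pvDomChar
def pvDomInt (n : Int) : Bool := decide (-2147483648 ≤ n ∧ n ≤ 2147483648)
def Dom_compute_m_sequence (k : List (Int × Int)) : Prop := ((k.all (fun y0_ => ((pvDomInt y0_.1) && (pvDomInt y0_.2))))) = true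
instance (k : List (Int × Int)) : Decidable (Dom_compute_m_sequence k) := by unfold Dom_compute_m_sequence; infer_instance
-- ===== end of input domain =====

-- B sorts the items once and scans adjacent pairs carrying the previous (key, value), replacing all dict
-- membership tests/lookups and the range(2, max(k)+1) scan; an alternative algorithm, not claimed faster.

-- ===== PORT A =====
def compute_m_sequence (k : List (Int × Int)) : List (Int × Int) :=
  let d := PySem.Dict.ofList k
  match PySem.List.max? d.keys (fun x => x) with
  | none => []  -- Python: max() of empty sequence raises ValueError; excluded by Pre_
  | some mx =>
    ((PySem.List.pyRange 2 (mx + 1) 1).foldl (fun m n =>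
        if d.contains n && d.contains (n - 1) then
          let adj_n : Int := d.getD n 0 - 2 * d.getD (n - 1) 0
          let m_n : Int := 2 ^ n.toNat - adj_n   -- n ≥ 2 inside the range, so 2**n = 2 ^ n.toNat exactly
          m.insert n m_n
        else m) PySem.Dict.empty).items

-- ===== PORT B =====
def compute_m_sequence_alt (k : List (Int × Int)) : List (Int × Int) :=
  let d := PySem.Dict.ofList k
  ((PySem.List.sorted d.items (fun item => item.1) false).foldl
      (fun (st : PySem.Dict Int Int × Option (Int × Int)) p =>
        (match st.2 with
         | some prev =>
             if prev.1 == p.1 - 1 && decide ((2:Int) ≤ p.1) then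
               st.1.insert p.1 (2 ^ p.1.toNat - p.2 + 2 * prev.2)  -- n ≥ 2 here, so 2**n = 2 ^ n.toNat exactly
             else st.1
         | none => st.1,
         some p))
      (PySem.Dict.empty, none)).1.items

-- ===== PRECONDITION & SPEC =====
-- Pre_ excludes only the empty dict, on which A raises ValueError (max() of an empty sequence).
def Pre_compute_m_sequence (k : List (Int × Int)) : Prop := k ≠ []
instance (k : List (Int × Int)) : Decidable (Pre_compute_m_sequence k) := by unfold Pre_compute_m_sequence; infer_instance
def pvWitness_compute_m_sequence : (List (Int × Int)) := [(1, 1), (2, 3)]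

def Spec_compute_m_sequence (k : List (Int × Int)) (out : List (Int × Int)) : Prop := out = compute_m_sequence_alt k
instance (k : List (Int × Int)) (out : List (Int × Int)) : Decidable (Spec_compute_m_sequence k out) := by unfold Spec_compute_m_sequence; infer_instance

-- ===== CLAIM (what is proved, stated in full; the proofs are below) =====
def Claim_equal_compute_m_sequence : Prop := ∀ (k : List (Int × Int)), Dom_compute_m_sequence k → Pre_compute_m_sequence k → Spec_compute_m_sequence k (compute_m_sequence k)

-- ===== LEMMAS AND PROOFS =====

-- B's fold's selection, made explicit: which (key, value) pairs the adjacent-pair scan inserts.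
def pvSel : Option (Int × Int) → List (Int × Int) → List (Int × Int)
  | _, [] => []
  | prev, p :: t =>
    (match prev with
     | some q =>
         if q.1 == p.1 - 1 && decide ((2:Int) ≤ p.1) then
           [(p.1, 2 ^ p.1.toNat - p.2 + 2 * q.2)]
         else []
     | none => []) ++ pvSel (some p) t

-- B's fold, characterised: over a strictly key-increasing list whose keys are fresh in m,
-- the final dict's items are m's items followed by the selected pairs.
theorem pv_fold_items :
    ∀ (cur : List (Int × Int)) (prev : Option (Int × Int)) (m : PySem.Dict Int Int),
      (∀ x ∈ cur.map Prod.fst, m.contains x = false) →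
      cur.Pairwise (fun a b => a.1 < b.1) →
      ((cur.foldl
          (fun (st : PySem.Dict Int Int × Option (Int × Int)) p =>
            (match st.2 with
             | some prev =>
                 if prev.1 == p.1 - 1 && decide ((2:Int) ≤ p.1) then
                   st.1.insert p.1 (2 ^ p.1.toNat - p.2 + 2 * prev.2)
                 else st.1
             | none => st.1,
             some p)) (m, prev)).1).items = m.items ++ pvSel prev cur := by
  intro cur
  induction cur with
  | nil => intro prev m _ _; simp [pvSel]
  | cons p t ih =>
    intro prev m hfresh hpw
    have hp1 : m.contains p.1 = false := hfresh p.1 (by simp)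
    have htlt : ∀ r ∈ t, p.1 < r.1 := fun r hr => (List.pairwise_cons.1 hpw).1 r hr
    simp only [List.foldl_cons]
    cases prev with
    | none =>
      dsimp only
      rw [ih (some p) m (fun x hx => hfresh x (List.mem_cons_of_mem _ hx))
          (List.pairwise_cons.1 hpw).2]
      simp [pvSel]
    | some q =>
      dsimp only
      by_cases hc : (q.1 == p.1 - 1 && decide ((2:Int) ≤ p.1)) = true
      · have hins : ∀ x ∈ t.map Prod.fst,
            (m.insert p.1 (2 ^ p.1.toNat - p.2 + 2 * q.2)).contains x = false := by
          intro x hx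
          rcases List.mem_map.1 hx with ⟨r, hr, hrx⟩
          have hlt : p.1 < x := hrx ▸ htlt r hr
          rw [PySem.Dict.contains_insert]
          have hne : (x == p.1) = false := by simp; omega
          rw [hne, Bool.false_or]
          exact hfresh x (List.mem_cons_of_mem _ hx)
        rw [if_pos hc]
        rw [ih (some p) _ hins (List.pairwise_cons.1 hpw).2]
        rw [PySem.Dict.items_insert_of_not_contains _ _ hp1]
        simp [pvSel, hc]
      · rw [if_neg hc]
        rw [ih (some p) m (fun x hx => hfresh x (List.mem_cons_of_mem _ hx))
            (List.pairwise_cons.1 hpw).2]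
        simp [pvSel, hc]

-- The selection equals a filter-and-map over the keys, given the scan invariant.
theorem pvSel_eq_filter_map (d : PySem.Dict Int Int) :
    ∀ (cur : List (Int × Int)) (prev : Option (Int × Int)),
      (∀ p ∈ cur, p.2 = d.getD p.1 0) →
      (∀ p ∈ cur, d.contains p.1 = true) →
      (∀ q, prev = some q → q.2 = d.getD q.1 0 ∧ d.contains q.1 = true) →
      (∀ q, prev = some q → ∀ p ∈ cur, q.1 < p.1) →
      cur.Pairwise (fun a b => a.1 < b.1) →
      (∀ x : Int, d.contains x = true →
        x ∈ cur.map Prod.fst ∨ ∃ q, prev = some q ∧ x ≤ q.1) →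
      pvSel prev cur
        = ((cur.map Prod.fst).filter (fun n => d.contains (n - 1) && decide (2 ≤ n))).map
            (fun n => (n, 2 ^ n.toNat - d.getD n 0 + 2 * d.getD (n - 1) 0)) := by
  intro cur
  induction cur with
  | nil => intro prev _ _ _ _ _ _; simp [pvSel]
  | cons p t ih =>
    intro prev hval hcont hprev hord hpw hcover
    have htlt : ∀ r ∈ t, p.1 < r.1 := fun r hr => (List.pairwise_cons.1 hpw).1 r hr
    -- if p.1 - 1 is a key, it cannot be among p :: t (all keys there are ≥ p.1)
    have hnot_in : p.1 - 1 ∉ (p :: t).map Prod.fst := by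
      intro hmem
      rcases List.mem_map.1 hmem with ⟨r, hr, hrx⟩
      rcases List.mem_cons.1 hr with h | h
      · rw [h] at hrx; omega
      · have := htlt r h
        omega
    have hrec := ih (some p)
        (fun r hr => hval r (List.mem_cons_of_mem _ hr))
        (fun r hr => hcont r (List.mem_cons_of_mem _ hr))
        (by rintro q rfl1; cases rfl1; exact ⟨hval p (by simp), hcont p (by simp)⟩)
        (by rintro q rfl1 r hr; cases rfl1; exact htlt r hr)
        (List.pairwise_cons.1 hpw).2
        (by
          intro x hx
          rcases hcover x hx with hmem | ⟨q, hq, hle⟩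
          · rcases List.mem_map.1 hmem with ⟨r, hr, hrx⟩
            rcases List.mem_cons.1 hr with h | h
            · right; exact ⟨p, rfl, by rw [← hrx, h]⟩
            · left; exact List.mem_map.2 ⟨r, h, hrx⟩
          · right
            have := hord q hq p (by simp)
            exact ⟨p, rfl, by omega⟩)
    simp only [List.map_cons, List.filter_cons]
    cases prev with
    | none =>
      -- no predecessor: p.1 - 1 is not a key, so the head is dropped on both sides
      have hc1 : d.contains (p.1 - 1) = false := by
        cases hcc : d.contains (p.1 - 1) with
        | false => rfl
        | true =>
          rcases hcover _ hcc with hmem | ⟨q, hq, _⟩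
          · exact absurd hmem hnot_in
          · exact absurd hq (by simp)
      simp only [pvSel, hc1, Bool.false_and, List.nil_append]
      exact hrec
    | some q =>
      obtain ⟨hqv, hqc⟩ := hprev q rfl
      have hqlt : q.1 < p.1 := hord q rfl p (by simp)
      by_cases heq : q.1 = p.1 - 1
      · -- predecessor key is exactly p.1 - 1, which therefore is a key
        have hc1 : d.contains (p.1 - 1) = true := by rw [← heq]; exact hqc
        by_cases h2 : (2 : Int) ≤ p.1
        · have hcnd : (q.1 == p.1 - 1 && decide ((2:Int) ≤ p.1)) = true := by
            simp [heq, h2]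
          simp only [pvSel, if_true, hc1, Bool.true_and, h2,
            decide_true, List.map_cons]
          rw [hrec]
          have hq2 : q.2 = d.getD (p.1 - 1) 0 := by rw [hqv, heq]
          rw [hval p (by simp), hq2]
          simp [heq]
        · have hcnd : (q.1 == p.1 - 1 && decide ((2:Int) ≤ p.1)) = false := by
            simp [h2]
          simp only [pvSel, hc1, Bool.true_and]
          simpa [hcnd, h2] using hrec
      · -- predecessor key is not p.1 - 1: then p.1 - 1 is no key at all
        have hc1 : d.contains (p.1 - 1) = false := by
          cases hcc : d.contains (p.1 - 1) with
          | false => rfl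
          | true =>
            rcases hcover _ hcc with hmem | ⟨q', hq', hle⟩
            · exact absurd hmem hnot_in
            · cases hq'
              omega
        have hcnd : (q.1 == p.1 - 1 && decide ((2:Int) ≤ p.1)) = false := by
          simp [heq]
        simp only [pvSel, hc1, Bool.false_and]
        simpa [hcnd] using hrec

-- Two strictly increasing lists with the same members are equal.
theorem pv_eq_of_pairwise_lt_of_mem : ∀ {l₁ l₂ : List Int}, l₁.Pairwise (· < ·) →
    l₂.Pairwise (· < ·) → (∀ x, x ∈ l₁ ↔ x ∈ l₂) → l₁ = l₂ := by
  intro l₁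
  induction l₁ with
  | nil =>
    intro l₂ _ _ h
    cases l₂ with
    | nil => rfl
    | cons b u => exact absurd ((h b).2 (by simp)) (by simp)
  | cons a t ih =>
    intro l₂ h₁ h₂ h
    cases l₂ with
    | nil => exact absurd ((h a).1 (by simp)) (by simp)
    | cons b u =>
      have hab : a = b := by
        have ha : a ∈ b :: u := (h a).1 (by simp)
        have hb : b ∈ a :: t := (h b).2 (by simp)
        rcases List.mem_cons.1 ha with h' | h'
        · exact h'
        rcases List.mem_cons.1 hb with h'' | h''
        · exact h''.symm
        · have := (List.pairwise_cons.1 h₁).1 _ h''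
          have := (List.pairwise_cons.1 h₂).1 _ h'
          omega
      subst hab
      have htu : ∀ x, x ∈ t ↔ x ∈ u := by
        intro x
        constructor
        · intro hx
          have hlt := (List.pairwise_cons.1 h₁).1 _ hx
          have : x ∈ a :: u := (h x).1 (List.mem_cons_of_mem _ hx)
          rcases List.mem_cons.1 this with h' | h'
          · omega
          · exact h'
        · intro hx
          have hlt := (List.pairwise_cons.1 h₂).1 _ hx
          have : x ∈ a :: t := (h x).2 (List.mem_cons_of_mem _ hx)
          rcases List.mem_cons.1 this with h' | h'
          · omega
          · exact h'
      rw [ih (List.pairwise_cons.1 h₁).2 (List.pairwise_cons.1 h₂).2 htu]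

-- A conditional insert-loop from the empty dict, over a list whose selected keys are distinct,
-- produces exactly the selected (key, value) pairs.
theorem pv_items_foldl_insert_if (l : List Int) (p : Int → Bool) (v : Int → Int)
    (hnd : (l.filter p).Nodup) :
    ((l.foldl (fun m n => if p n then m.insert n (v n) else m)
        (PySem.Dict.empty : PySem.Dict Int Int)).items)
      = (l.filter p).map (fun n => (n, v n)) := by
  rw [← List.foldl_filter (f := fun (m : PySem.Dict Int Int) n => m.insert n (v n))]
  have := PySem.Dict.items_foldl_insert_fresh (l.filter p) (fun n => n) v
      (PySem.Dict.empty : PySem.Dict Int Int)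
      (by intro a _; simp [PySem.Dict.contains_empty]) (by simpa using hnd)
  simpa [PySem.Dict.empty] using this

-- ===== VERDICT (by name: the statement is the Claim_ definition above) =====
theorem compute_m_sequence_spec : Claim_equal_compute_m_sequence := by
  intro k _ hk
  unfold Spec_compute_m_sequence compute_m_sequence compute_m_sequence_alt
  dsimp only
  set d := PySem.Dict.ofList k with hd
  have hnd : d.keys.Nodup := PySem.Dict.nodup_keys_ofList k
  set L := PySem.List.sorted d.items (fun item => item.1) false with hL
  -- facts about L
  have hperm : L.Perm d.items := PySem.List.sorted_perm _ _ _
  have hfperm : (L.map Prod.fst).Perm d.keys := by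
    have := hperm.map Prod.fst
    simpa [PySem.Dict.keys] using this
  have hfnd : (L.map Prod.fst).Nodup := hfperm.symm.nodup hnd
  have hLpw : L.Pairwise (fun a b => a.1 < b.1) := by
    have hle : L.Pairwise (fun a b => a.1 ≤ b.1) := PySem.List.sorted_pairwise _ _
    have hne : L.Pairwise (fun a b => a.1 ≠ b.1) := List.pairwise_map.mp hfnd
    exact (hle.and hne).imp (fun h => lt_of_le_of_ne h.1 h.2)
  have hfpw : (L.map Prod.fst).Pairwise (· < ·) := List.pairwise_map.2 hLpw
  -- B's side: fold = selection = filter-and-map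
  have hB := pv_fold_items L none PySem.Dict.empty
      (by intro x _; simp [PySem.Dict.contains_empty]) hLpw
  have hSel := pvSel_eq_filter_map d L none
      (by
        intro p hp
        obtain ⟨a, b⟩ := p
        have hmem : (a, b) ∈ d.items := (PySem.List.mem_sorted _ _ _ _).1 hp
        exact (PySem.Dict.getD_of_mem_items d hmem hnd 0).symm)
      (by
        intro p hp
        have hmem : p ∈ d.items := (PySem.List.mem_sorted _ _ _ _).1 hp
        exact (PySem.Dict.contains_iff_mem_keys d p.1).2 (PySem.Dict.mem_keys_of_mem_items d hmem))
      (fun q h => nomatch h) (fun q h => nomatch h) hLpw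
      (by
        intro x hx
        exact Or.inl (hfperm.mem_iff.2 ((PySem.Dict.contains_iff_mem_keys d x).1 hx)))
  -- A's side: max? returns some, and the fold is a filter-and-map
  have hkeys : d.keys = PySem.Set.ofList (k.map (·.1)) := by
    have := PySem.Dict.keys_foldl_insert_key (ν := Int) k (·.1) (fun _ p => p.2) PySem.Dict.empty
    simpa [PySem.Dict.ofList, PySem.Dict.update, PySem.Dict.keys_empty, PySem.Set.ofList,
      PySem.Set.update] using this
  have hne0 : d.keys ≠ [] := by
    cases k with
    | nil => exact absurd rfl hk
    | cons p t =>
      intro h0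
      have hp : p.1 ∈ d.keys := by
        rw [hkeys]; simp [PySem.Set.mem_ofList]
      rw [h0] at hp; simp at hp
  obtain ⟨mx, hmx⟩ : ∃ mx, PySem.List.max? d.keys (fun x => x) = some mx := by
    cases h : PySem.List.max? d.keys (fun x => x) with
    | none => exact absurd ((PySem.List.max?_eq_none_iff _ _).1 h) hne0
    | some m => exact ⟨m, rfl⟩
  rw [hmx]
  simp only
  have hApw : ((PySem.List.pyRange 2 (mx + 1) 1).filter
      (fun n => d.contains n && d.contains (n - 1))).Pairwise (· < ·) :=
    (PySem.List.pairwise_lt_pyRange_one _ _).filter _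
  have hBpw : ((L.map Prod.fst).filter
      (fun n => d.contains (n - 1) && decide ((2:Int) ≤ n))).Pairwise (· < ·) := hfpw.filter _
  rw [pv_items_foldl_insert_if _ _ _ (hApw.imp (fun h => ne_of_lt h))]
  rw [hB, hSel]
  have hfilter_eq :
      ((PySem.List.pyRange 2 (mx + 1) 1).filter (fun n => d.contains n && d.contains (n - 1)))
        = ((L.map Prod.fst).filter (fun n => d.contains (n - 1) && decide ((2:Int) ≤ n))) := by
    apply pv_eq_of_pairwise_lt_of_mem hApw hBpw
    intro x
    simp only [List.mem_filter, PySem.List.mem_pyRange_one, Bool.and_eq_true, decide_eq_true_eq]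
    constructor
    · rintro ⟨⟨h2, _⟩, hc, hc'⟩
      exact ⟨hfperm.mem_iff.2 ((PySem.Dict.contains_iff_mem_keys d x).1 hc), hc', h2⟩
    · rintro ⟨hmem, hc', h2⟩
      have hxk : x ∈ d.keys := hfperm.mem_iff.1 hmem
      have hle : x ≤ mx := PySem.List.max?_isMax hmx x hxk
      exact ⟨⟨h2, by omega⟩, (PySem.Dict.contains_iff_mem_keys d x).2 hxk, hc'⟩
  rw [hfilter_eq]
  simp only [PySem.Dict.empty, List.nil_append]
  apply List.map_congr_left
  intro n _
  have harith : (2 : Int) ^ n.toNat - (d.getD n 0 - 2 * d.getD (n - 1) 0)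
      = 2 ^ n.toNat - d.getD n 0 + 2 * d.getD (n - 1) 0 := by ring
  simp [harith]
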